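-- pv_equiv track=rewrite | github.com/IPeralta-GLSL/Unreal-Git-Client | core/git_manager.py | _is_valid_git_ref
-- ===== SOURCE A (Python) =====
-- def _is_valid_git_ref(ref):
--     if not ref or not isinstance(ref, str):
--         return False
--     if len(ref) > 256:
--         return False
--     dangerous_chars = [';', '|', '&', '$', '`', '(', ')', '{', '}', '<', '>', '\n', '\r', '\0']
--     for char in dangerous_chars:
--         if char in ref:
--             return False
--     return True
-- ===== SOURCE B (Python) =====
-- _DANGEROUS = frozenset(';|&$`(){}<>\n\r\0')
--
-- def _is_valid_git_ref(ref):
--     if not ref or not isinstance(ref, str):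
--         return False
--     if len(ref) > 256:
--         return False
--     return all(c not in _DANGEROUS for c in ref)
-- ===== Notes on version B (the rewrite author's own statement) =====
-- stated objective: idiomatic
-- what changed: Inverted the traversal: instead of 14 substring scans of the string (one per dangerous character), B makes a single pass over the string's characters testing each against a frozenset of the dangerous characters.
import Mathlib
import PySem

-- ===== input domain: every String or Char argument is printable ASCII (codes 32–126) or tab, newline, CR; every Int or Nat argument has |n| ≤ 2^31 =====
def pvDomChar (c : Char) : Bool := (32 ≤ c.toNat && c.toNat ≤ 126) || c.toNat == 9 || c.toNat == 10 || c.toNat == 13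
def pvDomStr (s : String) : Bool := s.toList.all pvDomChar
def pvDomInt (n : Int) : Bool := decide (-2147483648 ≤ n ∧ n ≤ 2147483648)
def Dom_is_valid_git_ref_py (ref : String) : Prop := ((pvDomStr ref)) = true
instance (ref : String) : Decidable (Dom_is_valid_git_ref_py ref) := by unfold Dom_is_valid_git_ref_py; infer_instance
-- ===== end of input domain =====

-- B replaces A's 14 per-character substring scans by one pass over the string's
-- characters against a set of the dangerous characters (idiomatic; return value only).

-- ===== PORT A =====
-- the dangerous_chars list of A, as one-character strings (A tests 'char in ref')
def pvDangerousStrs : List String :=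
  [";", "|", "&", "$", "`", "(", ")", "{", "}", "<", ">", "\n", "\r", "\u0000"]

-- A's for-loop with early return: first dangerous char found in ref → False
def pvLoopA (cs : List String) (ref : String) : Bool :=
  match cs with
  | [] => true
  | c :: rest => if PySem.Str.isIn c ref then false else pvLoopA rest ref

def is_valid_git_ref_py (ref : String) : Bool :=
  if ref.toList.isEmpty then false            -- 'not ref' (isinstance is always str here)
  else if PySem.Str.len ref > 256 then false
  else pvLoopA pvDangerousStrs ref

-- ===== PORT B =====
def pvDangerousSet : List Char :=
  [';', '|', '&', '$', '`', '(', ')', '{', '}', '<', '>', '\n', '\r', '\u0000']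

def is_valid_git_ref_py_alt (ref : String) : Bool :=
  if ref.toList.isEmpty then false
  else if PySem.Str.len ref > 256 then false
  else ref.toList.all (fun c => !(pvDangerousSet.contains c))   -- all(c not in set for c in ref)

-- ===== PRECONDITION & SPEC =====
def Spec_is_valid_git_ref_py (ref : String) (out : Bool) : Prop := out = is_valid_git_ref_py_alt ref
instance (ref : String) (out : Bool) : Decidable (Spec_is_valid_git_ref_py ref out) := by unfold Spec_is_valid_git_ref_py; infer_instance

-- ===== CLAIM (what is proved, stated in full; the proofs are below) =====
def Claim_equal_is_valid_git_ref_py : Prop := ∀ (ref : String), Dom_is_valid_git_ref_py ref → Spec_is_valid_git_ref_py ref (is_valid_git_ref_py ref)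

-- ===== LEMMAS AND PROOFS =====

-- 'c in s' for a one-character needle is exactly character membership
theorem isIn_singleton_iff (c : Char) (s : String) :
    PySem.Str.isIn (String.ofList [c]) s = true ↔ c ∈ s.toList := by
  rw [PySem.Str.isIn_iff_infix]
  constructor
  · intro h; exact h.subset (by simp)
  · intro h
    obtain ⟨pre, suf, hs⟩ := List.append_of_mem h
    exact ⟨pre, suf, by simp [hs]⟩

theorem pvLoopA_map_eq_true_iff (cs : List Char) (ref : String) :
    pvLoopA (cs.map (fun c => String.ofList [c])) ref = true ↔ ∀ c ∈ cs, c ∉ ref.toList := by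
  induction cs with
  | nil => simp [pvLoopA]
  | cons c rest ih =>
    simp only [List.map_cons, pvLoopA]
    split_ifs with h
    · simp [(isIn_singleton_iff c ref).mp h]
    · have hc : c ∉ ref.toList := fun hm => h ((isIn_singleton_iff c ref).mpr hm)
      simp [ih, hc]

theorem pvLoopA_eq (ref : String) :
    pvLoopA pvDangerousStrs ref = ref.toList.all (fun c => !(pvDangerousSet.contains c)) := by
  have hmap : pvDangerousStrs = pvDangerousSet.map (fun c => String.ofList [c]) := by rfl
  rw [hmap, Bool.eq_iff_iff, pvLoopA_map_eq_true_iff]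
  simp only [List.all_eq_true, Bool.not_eq_eq_eq_not, Bool.not_true, List.contains_eq_mem,
    decide_eq_false_iff_not]
  exact ⟨fun h x hx hc => h _ hc hx, fun h c hc hm => h _ hm hc⟩

-- ===== VERDICT (by name: the statement is the Claim_ definition above) =====
theorem is_valid_git_ref_py_spec : Claim_equal_is_valid_git_ref_py := by
  intro ref _
  unfold Spec_is_valid_git_ref_py is_valid_git_ref_py is_valid_git_ref_py_alt
  split_ifs <;> simp [pvLoopA_eq]
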